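-- pv_equiv track=rewrite | github.com/xngst/aocd_2021 | python/D7.py | cheapest_common_hline
-- ===== SOURCE A (Python) =====
-- def cheapest_common_hline(data):
--     ""
--     range_max = max(data)
--     cost_dict = {}
--     for i in range(range_max):
--         full_cost = 0
--         for d in data:
--             cost = abs(d-i)
--             full_cost += cost
--         cost_dict[i] = full_cost
--     return min(cost_dict.values())
-- ===== SOURCE B (Python) =====
-- def cheapest_common_hline(data):
--     range_max = max(data)
--     n = len(data)
--     hist = {}
--     for d in data:
--         hist[d] = hist.get(d, 0) + 1
--     cost = 0
--     cnt = 0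
--     for d in data:
--         cost += abs(d)
--         if d <= 0:
--             cnt += 1
--     best = cost
--     for i in range(1, range_max):
--         cost += 2 * cnt - n
--         cnt += hist.get(i, 0)
--         if cost < best:
--             best = cost
--     return best
-- ===== Notes on version B (the rewrite author's own statement) =====
-- stated objective: faster
-- what changed: Instead of rescanning all n points for every candidate line i in 0..max-1, B makes one pass to get the cost and below-count at line 0 and a value histogram, then sweeps i upward updating the cost incrementally by 2*count(d<=i)-n while tracking the minimum.
-- outside the precondition, e.g. on cheapest_common_hline([]): A raises ValueError, B raises ValueError; on cheapest_common_hline([-3, 0]): A raises ValueError, B returns 3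
import Mathlib
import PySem

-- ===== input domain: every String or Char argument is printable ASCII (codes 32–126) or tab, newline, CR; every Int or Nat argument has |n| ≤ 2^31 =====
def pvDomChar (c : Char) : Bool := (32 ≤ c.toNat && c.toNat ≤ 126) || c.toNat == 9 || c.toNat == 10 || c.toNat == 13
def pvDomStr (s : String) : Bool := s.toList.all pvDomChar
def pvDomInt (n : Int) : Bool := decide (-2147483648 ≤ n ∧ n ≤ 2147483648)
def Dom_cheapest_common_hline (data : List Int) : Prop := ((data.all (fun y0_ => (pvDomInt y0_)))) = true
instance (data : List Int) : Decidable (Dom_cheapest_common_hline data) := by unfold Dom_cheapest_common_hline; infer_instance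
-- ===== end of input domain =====

-- B replaces A's per-candidate rescan (cost of every line i recomputed from scratch) by a single
-- sweep that updates the cost incrementally from a value histogram: O(n + max) instead of O(n * max).

-- ===== PORT A =====
def cheapest_common_hline (data : List Int) : Int :=
  let range_max : Int := (PySem.List.max? data (fun x => x)).getD 0  -- max(data); none = ValueError, outside Pre_
  -- cost_dict[i] = full_cost: key i is fresh every iteration (i strictly increases), so the
  -- Python dict insert always appends; the items list is built back-to-front and reversed once,
  -- which is exact for this loop (same items in the same order).
  let cost_dict : PySem.Dict Int Int :=
    PySem.Dict.mk
      (((PySem.List.pyRange 0 range_max).foldl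
          (fun items i =>
            let full_cost := data.foldl (fun full_cost d => full_cost + |d - i|) 0
            (i, full_cost) :: items)
          []).reverse)
  (PySem.List.min? cost_dict.values (fun x => x)).getD 0  -- min() of empty raises; outside Pre_

-- ===== PORT B =====
def cheapest_common_hline_alt (data : List Int) : Int :=
  let range_max : Int := (PySem.List.max? data (fun x => x)).getD 0  -- max(data); none = ValueError, outside Pre_
  let n : Int := data.length
  let hist : PySem.Dict Int Int :=
    data.foldl (fun h d => h.insert d (h.getD d 0 + 1)) PySem.Dict.empty
  let init : Int × Int :=
    data.foldl (fun s d => (s.1 + |d|, if d ≤ 0 then s.2 + 1 else s.2)) (0, 0)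
  let fin : Int × Int × Int :=
    (PySem.List.pyRange 1 range_max).foldl
      (fun st i =>
        let cost := st.1 + 2 * st.2.1 - n
        let cnt := st.2.1 + hist.getD i 0
        (cost, cnt, if cost < st.2.2 then cost else st.2.2))
      (init.1, init.2, init.1)
  fin.2.2

-- ===== PRECONDITION & SPEC =====
-- Pre_ excludes exactly the inputs where A raises: empty data (max() ValueError) and
-- max(data) ≤ 0 (cost_dict stays empty, min() ValueError).
def Pre_cheapest_common_hline (data : List Int) : Prop := ∃ x ∈ data, 1 ≤ x
instance (data : List Int) : Decidable (Pre_cheapest_common_hline data) := by unfold Pre_cheapest_common_hline; infer_instance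
def pvWitness_cheapest_common_hline : List Int := [1, 3, 0]

def Spec_cheapest_common_hline (data : List Int) (out : Int) : Prop := out = cheapest_common_hline_alt data
instance (data : List Int) (out : Int) : Decidable (Spec_cheapest_common_hline data out) := by unfold Spec_cheapest_common_hline; infer_instance

-- ===== CLAIM (what is proved, stated in full; the proofs are below) =====
def Claim_equal_cheapest_common_hline : Prop := ∀ (data : List Int), Dom_cheapest_common_hline data → Pre_cheapest_common_hline data → Spec_cheapest_common_hline data (cheapest_common_hline data)

-- ===== LEMMAS AND PROOFS =====

-- f(i) = full cost of line i, exactly A's inner loop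
def pvF (data : List Int) (i : Int) : Int := data.foldl (fun fc d => fc + |d - i|) 0
-- number of data points at height ≤ i
def pvC (data : List Int) (i : Int) : Int := (data.countP (fun d => decide (d ≤ i)) : Int)

theorem pvF_step (data : List Int) (i : Int) :
    pvF data (i + 1) = pvF data i + (2 * pvC data i - data.length) := by
  unfold pvF pvC
  induction data with
  | nil => simp
  | cons a l ih =>
    rw [List.foldl_cons, List.foldl_cons, List.countP_cons]
    rw [PySem.List.foldl_add, PySem.List.foldl_add] at ih ⊢
    by_cases h : a ≤ i
    · simp only [h, decide_true]
      have h1 : |a - (i + 1)| = |a - i| + 1 := by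
        rw [abs_of_nonpos (by omega), abs_of_nonpos (by omega)]; ring
      push_cast at ih ⊢
      simp [List.length_cons] at ih ⊢
      omega
    · simp only [h, decide_false]
      have h1 : |a - (i + 1)| = |a - i| - 1 := by
        rw [abs_of_nonneg (by omega), abs_of_nonneg (by omega)]; ring
      push_cast at ih ⊢
      simp [List.length_cons] at ih ⊢
      omega

theorem pvC_step (data : List Int) (i : Int) :
    pvC data i = pvC data (i - 1) + data.count i := by
  unfold pvC
  induction data with
  | nil => simp
  | cons a l ih =>
    rw [List.countP_cons, List.countP_cons, List.count_cons]
    by_cases h : a = i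
    · subst h
      simp only [le_refl, decide_true]
      push_cast at ih ⊢
      have : ¬ (a ≤ a - 1) := by omega
      simp [this] at ih ⊢
      omega
    · have : (a ≤ i) ↔ (a ≤ i - 1) := by omega
      push_cast at ih ⊢
      simp [h, this] at ih ⊢
      omega

theorem pvSweep (data : List Int) (k : Nat) :
    (PySem.List.pyRange 1 (1 + (k : Int))).foldl
      (fun (st : Int × Int × Int) i =>
        (st.1 + 2 * st.2.1 - (data.length : Int),
         st.2.1 + (data.count i : Int),
         if st.1 + 2 * st.2.1 - (data.length : Int) < st.2.2 then
           st.1 + 2 * st.2.1 - (data.length : Int) else st.2.2))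
      (pvF data 0, pvC data 0, pvF data 0)
    = (pvF data (k : Int), pvC data (k : Int),
       ((PySem.List.pyRange 1 (1 + (k : Int))).map (pvF data)).foldl min (pvF data 0)) := by
  induction k with
  | zero =>
    have h : PySem.List.pyRange 1 (1 + ((0:Nat) : Int)) = [] := by decide
    rw [h]; simp
  | succ k ih =>
    have hcast : (1 : Int) + ((k + 1 : Nat) : Int) = (1 + (k : Int)) + 1 := by push_cast; ring
    have hrange : PySem.List.pyRange 1 (1 + ((k + 1 : Nat) : Int)) =
        PySem.List.pyRange 1 (1 + (k : Int)) ++ [1 + (k : Int)] := by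
      rw [hcast, PySem.List.pyRange_one_succ_right (by omega)]
    rw [hrange, List.foldl_append, List.map_append, List.foldl_append, ih]
    have hF : pvF data (1 + (k : Int)) =
        pvF data (k : Int) + 2 * pvC data (k : Int) - (data.length : Int) := by
      have := pvF_step data (k : Int)
      rw [show (1 : Int) + (k : Int) = (k : Int) + 1 by ring]
      omega
    have hC : pvC data (1 + (k : Int)) = pvC data (k : Int) + data.count (1 + (k : Int)) := by
      have := pvC_step data (1 + (k : Int))
      rw [show (1 : Int) + (k : Int) - 1 = (k : Int) by ring] at this
      omega
    simp only [List.foldl_cons, List.foldl_nil, List.map_cons, List.map_nil]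
    refine Prod.ext ?_ (Prod.ext ?_ ?_)
    · dsimp only; push_cast
      rw [show ((k : Int) + 1) = 1 + (k : Int) by ring, hF]
    · dsimp only; push_cast
      rw [show ((k : Int) + 1) = 1 + (k : Int) by ring, hC]
    · dsimp only
      rw [← hF]
      rcases lt_or_ge (pvF data (1 + (k:Int)))
        (((PySem.List.pyRange 1 (1 + (k:Int))).map (pvF data)).foldl min (pvF data 0)) with h | h
      · rw [if_pos h, min_eq_right (le_of_lt h)]
      · rw [if_neg (not_lt.mpr h), min_eq_left h]

theorem pvInit (data : List Int) :
    data.foldl (fun (s : Int × Int) d => (s.1 + |d|, if d ≤ 0 then s.2 + 1 else s.2)) (0, 0)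
      = (pvF data 0, pvC data 0) := by
  rw [PySem.List.foldl_prod_mk (f := fun (s : Int) d => s + |d|)
      (g := fun (s : Int) d => if d ≤ 0 then s + 1 else s)]
  refine Prod.ext ?_ ?_
  · simp [pvF, sub_zero]
  · simp [PySem.List.foldl_ite_add_one (fun d : Int => d ≤ 0), pvC]

theorem pvValues (data : List Int) (m : Int) :
    (PySem.Dict.mk
        (((PySem.List.pyRange 0 m).foldl
            (fun items i => (i, data.foldl (fun fc d => fc + |d - i|) 0) :: items) []).reverse)).values
      = (PySem.List.pyRange 0 m).map (pvF data) := by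
  have key : ∀ (l : List Int) (acc : List (Int × Int)),
      l.foldl (fun acc i => (i, data.foldl (fun fc d => fc + |d - i|) 0) :: acc) acc
        = (l.map (fun i => (i, pvF data i))).reverse ++ acc := by
    intro l
    induction l with
    | nil => simp
    | cons a t ih => intro acc; simp [ih, pvF]
  simp [PySem.Dict.values, key, pvF, Function.comp]

theorem cheapest_common_hline_spec : Claim_equal_cheapest_common_hline := by
  intro data _ hpre
  unfold Spec_cheapest_common_hline
  obtain ⟨x, hx, hx1⟩ := hpre
  cases hmax : PySem.List.max? data (fun x => x) with
  | none =>
    rw [PySem.List.max?_eq_none_iff] at hmax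
    subst hmax; simp at hx
  | some m =>
    have hm1 : 1 ≤ m := le_trans hx1 (PySem.List.max?_isMax hmax x hx)
    unfold cheapest_common_hline cheapest_common_hline_alt
    rw [hmax]
    simp only [Option.getD_some]
    -- A side: the dict's values are the costs of the lines 0, 1, …, m-1
    rw [pvValues data m]
    rw [PySem.List.pyRange_one_cons (by omega : (0:Int) < m), List.map_cons,
        PySem.List.min?_id_cons, Option.getD_some]
    -- B side: histogram lookups are counts, the two-accumulator pass is (pvF 0, pvC 0)
    simp only [PySem.Dict.getD_foldl_insert_add_one, PySem.Dict.getD_empty, zero_add, pvInit]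
    have hmk : m = 1 + (((m - 1).toNat : Nat) : Int) := by omega
    rw [hmk, pvSweep data ((m - 1).toNat)]
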